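-- pv_equiv track=rewrite | github.com/Nichijin/Image-Stitcher-app | image_stitcher/app.py | _reverse_rows_in_page
-- ===== SOURCE A (Python) =====
-- def _reverse_rows_in_page(page_paths, cols):
--     """
--     【方案 B】真正的水平镜像 (Horizontal Mirror)
--
--     逻辑：
--     将图片按行分组。
--     用 None 填充每一行，使其长度严格等于 cols (列数)。
--     对包含 None 的整行进行反转。
--     展平列表，保留 None 占位符。
--
--     效果示例 (5张图, 2行4列):
--     原始: [1, 2, 3, 4, 5]
--     分组补全: [[1, 2, 3, 4], [5, None, None, None]]
--     行内反转: [[4, 3, 2, 1], [None, None, None, 5]]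
--     展平后: [4, 3, 2, 1, None, None, None, 5]
--     """
--     if not page_paths:
--         return []
--
--     reversed_pages = []
--
--     # 1. 按行分组并处理
--     for i in range(0, len(page_paths), cols):
--         # 2. 提取当前行并补全空位
--         row = page_paths[i:i+cols]
--         # 用 None 填充到 cols 长度
--         while len(row) < cols:
--             row.append(None)
--
--         # 3. 对整行（包含 None）进行反转
--         row.reverse()
--
--         # 4. 添加到结果列表
--         reversed_pages.extend(row)
--
--     return reversed_pages
-- ===== SOURCE B (Python) =====
-- def _reverse_rows_in_page(page_paths, cols):
--     # Direct index gather: emit each output element once via position arithmetic,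
--     # no per-row slices, no padding list, no in-place reverse.
--     if not page_paths:
--         return []
--     n = len(page_paths)
--     out = []
--     for i in range(0, n, cols):
--         for j in range(cols):
--             idx = i + cols - 1 - j
--             out.append(page_paths[idx] if idx < n else None)
--     return out
-- ===== Notes on version B (the rewrite author's own statement) =====
-- stated objective: alternative
-- what changed: Replaces the slice/pad-with-None/in-place-reverse/extend pipeline by a single direct index gather (idx = i + cols - 1 - j) that emits each output element once without materializing or mutating any row list.
import Mathlib
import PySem

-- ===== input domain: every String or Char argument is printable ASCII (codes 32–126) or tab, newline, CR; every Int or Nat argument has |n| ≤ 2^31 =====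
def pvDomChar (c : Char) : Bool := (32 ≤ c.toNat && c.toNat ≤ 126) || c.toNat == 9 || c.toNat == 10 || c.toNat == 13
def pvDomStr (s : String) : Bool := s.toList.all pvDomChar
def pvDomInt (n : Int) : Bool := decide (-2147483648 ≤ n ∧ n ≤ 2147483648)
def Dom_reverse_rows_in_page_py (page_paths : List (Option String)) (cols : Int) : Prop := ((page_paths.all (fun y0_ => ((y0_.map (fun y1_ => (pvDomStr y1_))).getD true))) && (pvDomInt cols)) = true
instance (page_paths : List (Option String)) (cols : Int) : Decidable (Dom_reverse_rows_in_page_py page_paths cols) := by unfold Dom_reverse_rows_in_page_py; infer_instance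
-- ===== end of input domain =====

-- B replaces A's slice/pad-with-None/in-place-reverse/extend pipeline by a direct
-- index gather (idx = i + cols - 1 - j); equivalence is about the return value only.

-- ===== PORT A =====
-- 'while len(row) < cols: row.append(None)'
def padRowA (row : List (Option String)) (cols : Int) : List (Option String) :=
  if (row.length : Int) < cols then padRowA (row ++ [none]) cols else row
termination_by (cols - (row.length : Int)).toNat
decreasing_by simp; omega

def reverse_rows_in_page_py (page_paths : List (Option String)) (cols : Int) : List (Option String) :=
  if page_paths = [] then []
  else
    (PySem.List.pyRange 0 (page_paths.length : Int) cols).foldl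
      (fun reversed_pages i =>
        reversed_pages ++
          (padRowA (PySem.List.slice page_paths (some i) (some (i + cols))) cols).reverse)
      []

-- ===== PORT B =====
def reverse_rows_in_page_py_alt (page_paths : List (Option String)) (cols : Int) : List (Option String) :=
  if page_paths = [] then []
  else
    let n : Int := (page_paths.length : Int)
    (PySem.List.pyRange 0 n cols).foldl
      (fun out i =>
        out ++ (PySem.List.pyRange 0 cols 1).map (fun j =>
          let idx := i + cols - 1 - j
          -- 'page_paths[idx] if idx < n else None': idx ≥ 0 whenever accessed, so pyGetD is exact
          if idx < n then PySem.List.pyGetD page_paths idx none else none))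
      []

-- ===== PRECONDITION & SPEC =====
-- Pre_ excludes only cols = 0 with a non-empty list, where A raises ValueError (range step 0).
def Pre_reverse_rows_in_page_py (page_paths : List (Option String)) (cols : Int) : Prop :=
  page_paths = [] ∨ cols ≠ 0
instance (page_paths : List (Option String)) (cols : Int) : Decidable (Pre_reverse_rows_in_page_py page_paths cols) := by unfold Pre_reverse_rows_in_page_py; infer_instance

def pvWitness_reverse_rows_in_page_py : List (Option String) × Int :=
  ([some "a", some "b", some "c", none, some "d"], 3)

def Spec_reverse_rows_in_page_py (page_paths : List (Option String)) (cols : Int) (out : List (Option String)) : Prop := out = reverse_rows_in_page_py_alt page_paths cols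
instance (page_paths : List (Option String)) (cols : Int) (out : List (Option String)) : Decidable (Spec_reverse_rows_in_page_py page_paths cols out) := by unfold Spec_reverse_rows_in_page_py; infer_instance

-- ===== CLAIM (what is proved, stated in full; the proofs are below) =====
def Claim_equal_reverse_rows_in_page_py : Prop := ∀ (page_paths : List (Option String)) (cols : Int), Dom_reverse_rows_in_page_py page_paths cols → Pre_reverse_rows_in_page_py page_paths cols → Spec_reverse_rows_in_page_py page_paths cols (reverse_rows_in_page_py page_paths cols)

-- ===== LEMMAS AND PROOFS =====

lemma padRowA_eq (row : List (Option String)) (cols : Int) :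
    padRowA row cols = row ++ List.replicate ((cols - (row.length : Int)).toNat) none := by
  fun_induction padRowA row cols with
  | case1 row h ih =>
      rw [ih]
      have : ((cols - ((row ++ [none]).length : Int)).toNat) + 1
           = (cols - (row.length : Int)).toNat := by simp; omega
      rw [List.append_assoc]
      congr 1
      rw [← this, List.replicate_succ]
      simp
  | case2 row h =>
      have : (cols - (row.length : Int)).toNat = 0 := by omega
      simp [this]

lemma pyRange_neg_nil (n cols : Int) (h : cols < 0) (hn : 0 ≤ n) :
    PySem.List.pyRange 0 n cols = [] := by
  simp only [PySem.List.pyRange]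
  have h1 : ¬ cols = 0 := by omega
  have h2 : ¬ 0 < cols := by omega
  have h3 : ¬ n < 0 := by omega
  simp [h1, h2, h3]

lemma row_eq (pp : List (Option String)) (cols i : Int) (hc : 0 < cols) (hi : 0 ≤ i) :
    (padRowA (PySem.List.slice pp (some i) (some (i + cols))) cols).reverse
    = (PySem.List.pyRange 0 cols 1).map (fun j =>
        if i + cols - 1 - j < (pp.length : Int) then PySem.List.pyGetD pp (i + cols - 1 - j) none else none) := by
  rw [PySem.List.slice_toNat pp hi (by omega)]
  rw [padRowA_eq]
  set r : List (Option String) := List.take ((i + cols).toNat - i.toNat) (List.drop i.toNat pp) with hr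
  have hcols : (i + cols).toNat - i.toNat = cols.toNat := by omega
  have hrlen : r.length = min cols.toNat (pp.length - i.toNat) := by
    simp [hr, hcols]
  have hrle : r.length ≤ cols.toNat := by omega
  have hlen : (r ++ List.replicate ((cols - (r.length : Int)).toNat) none).length = cols.toNat := by
    simp; omega
  apply List.ext_getElem
  · simp only [List.length_reverse, hlen, List.length_map, PySem.List.length_pyRange_one]
    omega
  · intro k hk1 hk2
    rw [List.getElem_reverse]
    rw [List.getElem_map]
    rw [PySem.List.getElem_pyRange_one]
    have hkc : k < cols.toNat := by
      have := hk2; simp [PySem.List.length_pyRange_one] at this; omega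
    simp only [hlen]
    set t : Nat := cols.toNat - 1 - k with ht
    have hidx : i + cols - 1 - (0 + (k : Int)) = (i.toNat : Int) + (t : Int) := by omega
    rw [hidx]
    by_cases hin : t < r.length
    · rw [List.getElem_append_left hin]
      have hlt : (i.toNat : Int) + (t : Int) < (pp.length : Int) := by omega
      rw [if_pos hlt]
      rw [PySem.List.pyGetD_eq_getElem pp none (by omega) hlt]
      simp only [hr]
      rw [List.getElem_take, List.getElem_drop]
      congr 1
    · rw [List.getElem_append_right (by omega)]
      have hge : ¬ ((i.toNat : Int) + (t : Int) < (pp.length : Int)) := by omega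
      rw [if_neg hge]
      simp
-- ===== VERDICT (by name: the statement is the Claim_ definition above) =====
theorem reverse_rows_in_page_py_spec : Claim_equal_reverse_rows_in_page_py := by
  intro pp cols _ hpre
  unfold Spec_reverse_rows_in_page_py reverse_rows_in_page_py reverse_rows_in_page_py_alt
  by_cases hnil : pp = []
  · simp [hnil]
  · simp only [if_neg hnil]
    have hc0 : cols ≠ 0 := by cases hpre with
      | inl h => exact absurd h hnil
      | inr h => exact h
    rcases lt_or_gt_of_ne hc0 with hneg | hpos
    · rw [pyRange_neg_nil _ _ hneg (by positivity)]
      simp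
    · apply PySem.List.foldl_congr_mem
      intro acc i hi
      have h0i : 0 ≤ i := by
        rcases (PySem.List.mem_pyRange_iff_of_pos hpos i).mp hi with ⟨h1, _⟩
        exact h1
      rw [row_eq pp cols i hpos h0i]
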